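-- pv_equiv track=rewrite | github.com/lane-neuro/research-analytics-suite | research_analytics_suite/hardware_manager/interface/serial/Serial.py | _parse_serial_output_windows
-- ===== SOURCE A (Python) =====
-- from typing import List, Dict
--
-- def _parse_serial_output_windows(output: str) -> List[Dict[str, str]]:
--     """Parse the output of the mode command to find serial ports on Windows."""
--     serial_ports = []
--     current_port = []
--     for line in output.split('\n'):
--         if 'Status for device' in line:
--             if current_port:
--                 serial_ports.append({'description': '\n'.join(current_port).strip()})
--                 current_port = []
--         current_port.append(line.strip())
--     if current_port:
--         serial_ports.append({'description': '\n'.join(current_port).strip()})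
--     return serial_ports
-- ===== SOURCE B (Python) =====
-- def _parse_serial_output_windows(output):
--     """Parse the output of the mode command to find serial ports on Windows."""
--     lines = output.split('\n')
--     groups = []
--     i = 0
--     while i < len(lines):
--         j = i + 1
--         while j < len(lines) and 'Status for device' not in lines[j]:
--             j += 1
--         chunk = lines[i:j]
--         groups.append({'description': '\n'.join(l.strip() for l in chunk).strip()})
--         i = j
--     return groups
-- ===== Notes on version B (the rewrite author's own statement) =====
-- stated objective: alternative
-- what changed: Replaces A's incremental accumulate-and-flush loop (mutable current_port flushed at each marker and at the end) with a chunk-at-a-time scan that first finds each chunk's extent (next marker index after the chunk start) and then emits one group per slice.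
import Mathlib
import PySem

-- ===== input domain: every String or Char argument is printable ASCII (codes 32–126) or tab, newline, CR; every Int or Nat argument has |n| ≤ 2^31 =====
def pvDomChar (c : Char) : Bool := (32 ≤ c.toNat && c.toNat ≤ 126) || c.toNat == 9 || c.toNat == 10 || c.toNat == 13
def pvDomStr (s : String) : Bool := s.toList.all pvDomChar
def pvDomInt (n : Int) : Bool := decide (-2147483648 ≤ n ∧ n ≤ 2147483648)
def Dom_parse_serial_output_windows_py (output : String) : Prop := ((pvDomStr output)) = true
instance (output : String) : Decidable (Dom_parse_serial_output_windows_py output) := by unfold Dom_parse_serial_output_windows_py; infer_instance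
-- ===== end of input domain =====

-- B replaces A's accumulate-and-flush loop with a chunk-at-a-time scan (find each chunk's extent, emit one group per slice); same cost, different decomposition.


-- ===== PORT A =====
-- one iteration of A's for-loop: maybe flush current_port at a marker line, then append line.strip()
def pvStepA (st : List (List (String × String)) × List String) (line : String) :
    List (List (String × String)) × List String :=
  let st :=
    if PySem.Str.isIn "Status for device" line then
      if st.2 ≠ [] then
        (st.1 ++ [[("description", PySem.Str.strip (PySem.Str.join "\n" st.2))]], ([] : List String))
      else st
    else st
  (st.1, st.2 ++ [PySem.Str.strip line])

-- output.split('\n'): the separator "\n" is non-empty, so Str.split? is always `some`; getD [] is exact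
def parse_serial_output_windows_py (output : String) : List (List (String × String)) :=
  let st := ((PySem.Str.split? output "\n").getD []).foldl pvStepA ([], [])
  if st.2 ≠ [] then
    st.1 ++ [[("description", PySem.Str.strip (PySem.Str.join "\n" st.2))]]
  else st.1

-- ===== PORT B =====
-- one group from a chunk of raw lines (B's '\n'.join(l.strip() for l in chunk).strip())
def pvMkGroup (chunk : List String) : List (String × String) :=
  [("description", PySem.Str.strip (PySem.Str.join "\n" (chunk.map PySem.Str.strip)))]

-- B's outer while-loop: the chunk starting at the current position runs until the next marker line
def pvGroups : List String → List (List (String × String))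
  | [] => []
  | l :: rest =>
    let body := rest.takeWhile (fun x => !(PySem.Str.isIn "Status for device" x))
    pvMkGroup (l :: body) :: pvGroups (rest.drop body.length)
  termination_by ls => ls.length
  decreasing_by simp only [List.length_drop, List.length_cons]; omega

def parse_serial_output_windows_py_alt (output : String) : List (List (String × String)) :=
  pvGroups ((PySem.Str.split? output "\n").getD [])

-- ===== PRECONDITION & SPEC =====
def Spec_parse_serial_output_windows_py (output : String) (out : List (List (String × String))) : Prop := out = parse_serial_output_windows_py_alt output
instance (output : String) (out : List (List (String × String))) : Decidable (Spec_parse_serial_output_windows_py output out) := by unfold Spec_parse_serial_output_windows_py; infer_instance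

-- ===== CLAIM (what is proved, stated in full; the proofs are below) =====
def Claim_equal_parse_serial_output_windows_py : Prop := ∀ (output : String), Dom_parse_serial_output_windows_py output → Spec_parse_serial_output_windows_py output (parse_serial_output_windows_py output)

-- ===== LEMMAS AND PROOFS =====

-- proof-side abbreviation: the group A emits from a flushed current_port (already-stripped lines)
def pvMk' (cp : List String) : List (String × String) :=
  [("description", PySem.Str.strip (PySem.Str.join "\n" cp))]

-- characterisation of the remainder of A's run given a nonempty current_port
def pvChunks (cp : List String) : List String → List (List (String × String))
  | [] => [pvMk' cp]
  | l :: ls =>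
    if PySem.Str.isIn "Status for device" l then
      pvMk' cp :: pvChunks [PySem.Str.strip l] ls
    else
      pvChunks (cp ++ [PySem.Str.strip l]) ls

lemma pvFoldA_chunks (ls : List String) :
    ∀ (done : List (List (String × String))) (cp : List String), cp ≠ [] →
    (if (ls.foldl pvStepA (done, cp)).2 ≠ [] then
       (ls.foldl pvStepA (done, cp)).1 ++ [pvMk' (ls.foldl pvStepA (done, cp)).2]
     else (ls.foldl pvStepA (done, cp)).1) = done ++ pvChunks cp ls := by
  induction ls with
  | nil =>
    intro done cp hcp
    simp only [List.foldl_nil, pvChunks]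
    rw [if_pos hcp]
  | cons l ls ih =>
    intro done cp hcp
    cases hm : PySem.Str.isIn "Status for device" l with
    | true =>
      have hstep : pvStepA (done, cp) l = (done ++ [pvMk' cp], [PySem.Str.strip l]) := by
        simp only [pvStepA, pvMk']
        rw [if_pos hm, if_pos hcp]
        rfl
      rw [List.foldl_cons, hstep, ih (done ++ [pvMk' cp]) [PySem.Str.strip l] (by simp)]
      simp only [pvChunks]
      rw [if_pos hm]
      simp only [List.append_assoc, List.singleton_append]
    | false =>
      have hstep : pvStepA (done, cp) l = (done, cp ++ [PySem.Str.strip l]) := by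
        simp only [pvStepA]
        rw [if_neg (by rw [hm]; decide)]
      rw [List.foldl_cons, hstep, ih done (cp ++ [PySem.Str.strip l]) (by simp)]
      simp only [pvChunks]
      rw [if_neg (by rw [hm]; decide)]

lemma pvChunks_eq_groups (ls : List String) :
    ∀ (cp : List String),
    pvChunks cp ls =
      pvMk' (cp ++ (ls.takeWhile (fun x => !(PySem.Str.isIn "Status for device" x))).map PySem.Str.strip)
        :: pvGroups (ls.drop (ls.takeWhile (fun x => !(PySem.Str.isIn "Status for device" x))).length) := by
  induction ls with
  | nil =>
    intro cp
    have hG : pvGroups [] = [] := by rw [pvGroups]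
    simp only [pvChunks, List.takeWhile_nil, List.map_nil, List.append_nil, List.length_nil,
      List.drop_zero, hG]
  | cons l ls ih =>
    intro cp
    cases hm : PySem.Str.isIn "Status for device" l with
    | true =>
      simp only [pvChunks]
      rw [if_pos hm, ih [PySem.Str.strip l], List.takeWhile_cons]
      rw [if_neg (by rw [hm]; decide)]
      have hG : pvGroups (l :: ls) =
          pvMkGroup (l :: ls.takeWhile (fun x => !(PySem.Str.isIn "Status for device" x)))
            :: pvGroups (ls.drop (ls.takeWhile (fun x => !(PySem.Str.isIn "Status for device" x))).length) := by
        rw [pvGroups]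
      simp only [List.map_nil, List.append_nil, List.length_nil, List.drop_zero, hG,
        pvMkGroup, pvMk', List.map_cons, List.singleton_append]
    | false =>
      simp only [pvChunks]
      rw [if_neg (by rw [hm]; decide), ih (cp ++ [PySem.Str.strip l]), List.takeWhile_cons]
      rw [if_pos (by rw [hm]; decide)]
      simp only [List.map_cons, List.length_cons, List.drop_succ_cons, List.append_assoc,
        List.singleton_append]

-- ===== VERDICT (by name: the statement is the Claim_ definition above) =====
theorem parse_serial_output_windows_py_spec : Claim_equal_parse_serial_output_windows_py := by
  intro output _
  unfold Spec_parse_serial_output_windows_py parse_serial_output_windows_py parse_serial_output_windows_py_alt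
  cases h : (PySem.Str.split? output "\n").getD [] with
  | nil =>
    have hG : pvGroups [] = [] := by rw [pvGroups]
    simp [hG]
  | cons l rest =>
    have hstep : pvStepA (([] : List (List (String × String))), ([] : List String)) l
        = ([], [PySem.Str.strip l]) := by
      cases hm : PySem.Str.isIn "Status for device" l with
      | true =>
        simp only [pvStepA]
        rw [if_pos hm, if_neg (fun hc => hc rfl)]
        rfl
      | false =>
        simp only [pvStepA]
        rw [if_neg (by rw [hm]; decide)]
        rfl
    simp only [List.foldl_cons, hstep]
    have hmain := pvFoldA_chunks rest [] [PySem.Str.strip l] (by simp)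
    rw [pvChunks_eq_groups rest [PySem.Str.strip l]] at hmain
    simp only [pvMk'] at hmain
    rw [hmain]
    have hG : pvGroups (l :: rest) =
        pvMkGroup (l :: rest.takeWhile (fun x => !(PySem.Str.isIn "Status for device" x)))
          :: pvGroups (rest.drop (rest.takeWhile (fun x => !(PySem.Str.isIn "Status for device" x))).length) := by
      rw [pvGroups]
    rw [hG]
    simp only [pvMkGroup, List.map_cons, List.nil_append, List.singleton_append]
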